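-- pv_equiv track=rewrite | github.com/iscumadalina/FP | src/lecture/live-coding/lecture_4.py | chip_conquer
-- ===== SOURCE A (Python) =====
-- def chip_conquer(data: list) -> int:
--     if len(data) == 1:
--         if data[0] > 0:
--             return data[0]
--         else:
--             return 1
--
--     p = (data[0] if data[0] > 0 else 1)
--     return p * chip_conquer(data[1:])
-- ===== SOURCE B (Python) =====
-- def chip_conquer(data: list) -> int:
--     product = data[0] if data[0] > 0 else 1
--     for x in data[1:]:
--         product *= x if x > 0 else 1
--     return product
-- ===== Notes on version B (the rewrite author's own statement) =====
-- stated objective: faster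
-- what changed: Replaces the linear recursion, whose per-call tail slicing makes A quadratic, by a single iterative loop maintaining a running product seeded from the first element.
import Mathlib
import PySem

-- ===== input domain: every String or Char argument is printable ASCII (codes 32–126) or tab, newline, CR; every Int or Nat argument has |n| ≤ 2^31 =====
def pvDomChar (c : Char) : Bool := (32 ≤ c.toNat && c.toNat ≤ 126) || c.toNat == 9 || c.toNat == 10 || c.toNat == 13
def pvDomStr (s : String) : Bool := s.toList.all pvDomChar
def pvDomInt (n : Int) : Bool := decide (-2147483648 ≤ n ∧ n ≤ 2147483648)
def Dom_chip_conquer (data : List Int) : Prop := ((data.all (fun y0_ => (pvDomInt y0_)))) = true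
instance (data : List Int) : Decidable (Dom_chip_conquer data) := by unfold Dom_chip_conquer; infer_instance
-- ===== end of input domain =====

-- B replaces A's recursion-over-tail (quadratic slicing) by a single iterative fold; return values proved equal on non-empty lists.

-- ===== PORT A =====
-- Literal port of A's recursion: base case len(data) == 1, else head factor times recursive call on the tail.
-- The [] case is unreachable inside Pre_ (Python raises IndexError reading the first element); 1 is a placeholder.
def chip_conquer : List Int → Int
  | [] => 1
  | [x] => if x > 0 then x else 1
  | x :: rest => (if x > 0 then x else 1) * chip_conquer rest

-- ===== PORT B =====
-- Literal port of Source B: product seeded from data[0], one loop over data[1:].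
-- The [] case is unreachable inside Pre_ (Python raises IndexError reading the first element); 1 is a placeholder.
def chip_conquer_alt (data : List Int) : Int :=
  match data with
  | [] => 1
  | x :: rest =>
    rest.foldl (fun product y => product * (if y > 0 then y else 1)) (if x > 0 then x else 1)

-- ===== PRECONDITION & SPEC =====
-- Pre_ excludes the empty list, on which Python A raises IndexError reading the first element.
def Pre_chip_conquer (data : List Int) : Prop := data ≠ []
instance (data : List Int) : Decidable (Pre_chip_conquer data) := by unfold Pre_chip_conquer; infer_instance
def pvWitness_chip_conquer : List Int := [3, -2, 5]

def Spec_chip_conquer (data : List Int) (out : Int) : Prop := out = chip_conquer_alt data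
instance (data : List Int) (out : Int) : Decidable (Spec_chip_conquer data out) := by unfold Spec_chip_conquer; infer_instance

-- ===== CLAIM (what is proved, stated in full; the proofs are below) =====
def Claim_equal_chip_conquer : Prop := ∀ (data : List Int), Dom_chip_conquer data → Pre_chip_conquer data → Spec_chip_conquer data (chip_conquer data)

-- ===== LEMMAS AND PROOFS =====

theorem chip_conquer_cons (x : Int) (rest : List Int) :
    chip_conquer (x :: rest) = (if x > 0 then x else 1) * chip_conquer rest := by
  cases rest with
  | nil => simp [chip_conquer]
  | cons y ys => rfl

theorem foldl_mul_chip (l : List Int) (acc : Int) :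
    l.foldl (fun product y => product * (if y > 0 then y else 1)) acc = acc * chip_conquer l := by
  induction l generalizing acc with
  | nil => simp [chip_conquer]
  | cons y ys ih =>
    rw [List.foldl_cons, ih, chip_conquer_cons, mul_assoc]

-- ===== VERDICT (by name: the statement is the Claim_ definition above) =====
theorem chip_conquer_spec : Claim_equal_chip_conquer := by
  intro data _ hpre
  unfold Spec_chip_conquer
  cases data with
  | nil => exact absurd rfl hpre
  | cons x rest =>
    simp only [chip_conquer_alt, foldl_mul_chip, chip_conquer_cons]
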